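-- pv_equiv track=rewrite | github.com/juanplopes/sketches | hyperloglog_minhash.py | real
-- ===== SOURCE A (Python) =====
-- def normal_compare(A, B):
--     SA = set(A)
--     SB = set(B)
--     return len(SA.intersection(SB))
--
-- def real(works):
--     real = {}
--     for i in range(len(works)):
--         for j in range(i+1, len(works)):
--             name1, words1 = works[i]
--             name2, words2 = works[j]
--             real[(name1, name2)] = normal_compare(words1, words2)
--     return real
-- ===== SOURCE B (Python) =====
-- from itertools import combinations
--
-- def real(works):
--     n = len(works)
--     # inverted index: word -> increasing list of work indices containing it
--     index = {}
--     for i, (name, words) in enumerate(works):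
--         for w in set(words):
--             index[w] = index.get(w, []) + [i]
--     # accumulate intersection sizes word by word
--     counts = {}
--     for plist in index.values():
--         for a, b in combinations(plist, 2):
--             key = (a, b)
--             counts[key] = counts.get(key, 0) + 1
--     # assemble the result for every pair, in A's pair order
--     res = {}
--     for i in range(n):
--         for j in range(i + 1, n):
--             res[(works[i][0], works[j][0])] = counts.get((i, j), 0)
--     return res
-- ===== Notes on version B (the rewrite author's own statement) =====
-- stated objective: alternative
-- what changed: B builds an inverted index from each word to the list of work indices containing it and accumulates every shared word into a pair counter, instead of computing a set intersection for each of the O(n^2) pairs; the result dict is assembled in the same pair order.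
import Mathlib
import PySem

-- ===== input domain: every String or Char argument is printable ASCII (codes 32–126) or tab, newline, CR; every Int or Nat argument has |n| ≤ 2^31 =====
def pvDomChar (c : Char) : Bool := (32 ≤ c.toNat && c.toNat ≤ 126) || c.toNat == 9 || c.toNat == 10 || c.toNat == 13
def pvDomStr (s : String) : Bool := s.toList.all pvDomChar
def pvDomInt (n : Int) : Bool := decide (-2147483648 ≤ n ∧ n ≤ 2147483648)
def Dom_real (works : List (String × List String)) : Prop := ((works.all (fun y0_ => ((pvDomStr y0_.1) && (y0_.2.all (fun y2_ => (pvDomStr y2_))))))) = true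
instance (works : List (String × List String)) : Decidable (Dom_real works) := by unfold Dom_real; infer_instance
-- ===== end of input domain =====

-- B replaces A's per-pair set intersections by an inverted index (word -> index list) whose
-- posting lists are accumulated into a pair counter; same return value, alternative algorithm.

-- ===== PORT A =====
def normalCompare (A B : List String) : Int :=
  let SA : PySem.Set String := PySem.Set.ofList A
  let SB : PySem.Set String := PySem.Set.ofList B
  PySem.Set.len (PySem.Set.inter SA SB)

def real (works : List (String × List String)) : List (String × String × Int) :=
  (((PySem.List.pyRange 0 works.length).foldl (fun d i =>
      (PySem.List.pyRange (i + 1) works.length).foldl (fun d j =>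
        d.insert ((PySem.List.pyGetD works i ("", [])).1,
                  (PySem.List.pyGetD works j ("", [])).1)
          (normalCompare (PySem.List.pyGetD works i ("", [])).2
                         (PySem.List.pyGetD works j ("", [])).2)) d)
    (PySem.Dict.empty : PySem.Dict (String × String) Int)).items).map
      (fun p => (p.1.1, p.1.2, p.2))

-- ===== PORT B =====
-- word -> increasing list of indices of the works containing it
def altIndex (works : List (String × List String)) : PySem.Dict String (List Int) :=
  (PySem.List.enumerate works).foldl (fun d p =>
    (PySem.Set.ofList p.2.2).foldl (fun d w => d.modify w [] (fun l => l ++ [p.1])) d)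
    PySem.Dict.empty

-- (i, j) -> number of words shared by work i and work j
def altCounts (works : List (String × List String)) : PySem.Dict (Int × Int) Int :=
  (altIndex works).values.foldl (fun d plist =>
    (PySem.List.combinations plist 2).foldl (fun d c =>
      match c with
      | [a, b] => d.modify (a, b) 0 (fun v => v + 1)
      | _ => d) d) PySem.Dict.empty

def real_alt (works : List (String × List String)) : List (String × String × Int) :=
  (((PySem.List.pyRange 0 works.length).foldl (fun d i =>
      (PySem.List.pyRange (i + 1) works.length).foldl (fun d j =>
        d.insert ((PySem.List.pyGetD works i ("", [])).1,
                  (PySem.List.pyGetD works j ("", [])).1)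
          ((altCounts works).getD (i, j) 0)) d)
    (PySem.Dict.empty : PySem.Dict (String × String) Int)).items).map
      (fun p => (p.1.1, p.1.2, p.2))

-- ===== PRECONDITION & SPEC =====
def Spec_real (works : List (String × List String)) (out : List (String × String × Int)) : Prop := out = real_alt works
instance (works : List (String × List String)) (out : List (String × String × Int)) : Decidable (Spec_real works out) := by unfold Spec_real; infer_instance

-- ===== CLAIM (what is proved, stated in full; the proofs are below) =====
def Claim_equal_real : Prop := ∀ (works : List (String × List String)), Dom_real works → Spec_real works (real works)

-- ===== LEMMAS AND PROOFS =====

-- the per-work distinct word set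
def wset (works : List (String × List String)) (k : Nat) : PySem.Set String :=
  PySem.Set.ofList (works.getD k ("", [])).2

-- first two elements of a length-2 combination
def toPair (c : List Int) : Int × Int :=
  match c with
  | a :: b :: _ => (a, b)
  | _ => (0, 0)

theorem filter_beq_nodup {α : Type} [BEq α] [LawfulBEq α] (l : List α) (w : α) (h : l.Nodup) :
    l.filter (· == w) = if w ∈ l then [w] else [] := by
  rw [List.filter_beq]
  rcases Nat.eq_zero_or_pos (l.count w) with h0 | hp
  · simp [List.count_eq_zero.mp h0, h0]
  · have hle := List.nodup_iff_count_le_one.mp h w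
    have h1 : l.count w = 1 := by omega
    simp [h1, List.count_pos_iff.mp hp]

theorem filter_map_eq_flatMap {α β : Type} (l : List α) (p : α → Bool) (g : α → β) :
    (l.filter p).map g = l.flatMap (fun x => if p x then [g x] else []) := by
  induction l with
  | nil => rfl
  | cons x t ih => by_cases h : p x <;> simp [h, ih]

theorem mem_enumerate {α : Type} (xs : List α) (s : Int) (p : Int × α) :
    p ∈ PySem.List.enumerate xs s ↔ ∃ k : Nat, p.1 = s + k ∧ xs[k]? = some p.2 := by
  induction xs generalizing s with
  | nil => simp [PySem.List.enumerate]
  | cons x t ih =>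
    simp only [PySem.List.enumerate, List.mem_cons, ih]
    constructor
    · rintro (rfl | ⟨k, hk, hg⟩)
      · exact ⟨0, by simp⟩
      · exact ⟨k + 1, by push_cast at *; constructor; omega; simpa using hg⟩
    · rintro ⟨k, hk, hg⟩
      cases k with
      | zero =>
        left
        simp at hg hk
        obtain ⟨a, b⟩ := p
        simp_all
      | succ k =>
        right
        exact ⟨k, by push_cast at *; constructor; omega; simpa using hg⟩

theorem enumerate_fst_ge {α : Type} (xs : List α) (s : Int) :
    ∀ p ∈ PySem.List.enumerate xs s, s ≤ p.1 := by
  induction xs generalizing s with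
  | nil => simp [PySem.List.enumerate]
  | cons x t ih =>
    intro p hp
    simp only [PySem.List.enumerate, List.mem_cons] at hp
    rcases hp with rfl | hp
    · simp
    · have := ih (s + 1) p hp; omega

theorem enumerate_pairwise {α : Type} (xs : List α) (s : Int) :
    (PySem.List.enumerate xs s).Pairwise (fun p q => p.1 < q.1) := by
  induction xs generalizing s with
  | nil => simp [PySem.List.enumerate]
  | cons x t ih =>
    simp only [PySem.List.enumerate]
    refine List.Pairwise.cons (fun q hq => ?_) (ih (s + 1))
    have := enumerate_fst_ge t (s + 1) q hq
    simp; omega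

theorem altIndex_getD (works : List (String × List String)) (w : String) :
    (altIndex works).getD w [] =
      ((PySem.List.enumerate works).filter
        (fun p => decide (w ∈ PySem.Set.ofList p.2.2))).map (·.1) := by
  unfold altIndex
  have h1 : ∀ (d : PySem.Dict String (List Int)) (p : Int × (String × List String)),
      (PySem.Set.ofList p.2.2).foldl (fun d w => d.modify w [] (fun l => l ++ [p.1])) d
        = ((PySem.Set.ofList p.2.2 : List String).map (fun w => (w, p.1))).foldl
            (fun d q => d.modify q.1 [] (fun l => l ++ [q.2])) d := by
    intro d p; rw [List.foldl_map]
  rw [PySem.List.foldl_congr_mem _ _ _ _ (fun acc x _ => h1 acc x)]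
  rw [← List.foldl_flatMap]
  rw [PySem.Dict.getD_foldl_modify_append]
  rw [PySem.Dict.getD_empty, List.nil_append]
  rw [List.filter_flatMap, List.map_flatMap, filter_map_eq_flatMap]
  apply List.flatMap_congr
  intro p _
  rw [List.filter_map]
  have hc : ((fun q => q.1 == w) ∘ (fun w' => (w', p.1))) = (fun w' => w' == w) := rfl
  rw [hc, filter_beq_nodup _ _ (PySem.Set.nodup_ofList _)]
  by_cases h : w ∈ PySem.Set.ofList p.2.2 <;> simp [h]

theorem altIndex_getD_pairwise (works : List (String × List String)) (w : String) :
    ((altIndex works).getD w []).Pairwise (· < ·) := by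
  rw [altIndex_getD, List.pairwise_map]
  exact List.Pairwise.sublist List.filter_sublist (enumerate_pairwise works 0)

theorem mem_altIndex_getD (works : List (String × List String)) (w : String) (i : Nat)
    (hi : i < works.length) :
    (i : Int) ∈ (altIndex works).getD w [] ↔ w ∈ wset works i := by
  rw [altIndex_getD, List.mem_map]
  constructor
  · rintro ⟨p, hp, hp1⟩
    rw [List.mem_filter] at hp
    obtain ⟨hpE, hpw⟩ := hp
    obtain ⟨k, hk1, hk2⟩ := (mem_enumerate _ _ _).mp hpE
    have hki : k = i := by omega
    subst hki
    simp only [decide_eq_true_eq] at hpw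
    have : works.getD k ("", []) = p.2 := by
      rw [List.getD_eq_getElem?_getD, hk2]; rfl
    rw [wset, this]; exact hpw
  · intro hw
    refine ⟨((i : Int), works.getD i ("", [])), ?_, rfl⟩
    rw [List.mem_filter]
    constructor
    · rw [mem_enumerate]
      exact ⟨i, by simp, by rw [List.getElem?_eq_getElem hi, List.getD_eq_getElem _ _ hi]⟩
    · simpa [wset] using hw

theorem altIndex_keys (works : List (String × List String)) :
    (altIndex works).keys =
      PySem.Set.ofList ((PySem.List.enumerate works).flatMap
        (fun p => (PySem.Set.ofList p.2.2 : List String))) := by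
  unfold altIndex
  have h1 : ∀ (d : PySem.Dict String (List Int)) (p : Int × (String × List String)),
      (PySem.Set.ofList p.2.2).foldl (fun d w => d.modify w [] (fun l => l ++ [p.1])) d
        = ((PySem.Set.ofList p.2.2 : List String).map (fun w => (w, p.1))).foldl
            (fun d q => d.modify q.1 [] (fun l => l ++ [q.2])) d := by
    intro d p; rw [List.foldl_map]
  rw [PySem.List.foldl_congr_mem _ _ _ _ (fun acc x _ => h1 acc x)]
  rw [← List.foldl_flatMap]
  have h2 := PySem.Dict.keys_foldl_modify_key
      ((PySem.List.enumerate works).flatMap (fun x => (PySem.Set.ofList x.2.2 : List String).map (fun w => (w, x.1))))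
      (fun q => q.1) ([] : List Int) (fun _ q l => l ++ [q.2]) PySem.Dict.empty
  rw [h2]
  rw [show (PySem.Dict.empty : PySem.Dict String (List Int)).keys = [] from rfl]
  rw [PySem.Set.update_nil_left]
  congr 1
  rw [List.map_flatMap]
  apply List.flatMap_congr
  intro p _
  simp [Function.comp_def]

theorem altIndex_keys_nodup (works : List (String × List String)) :
    (altIndex works).keys.Nodup := by
  rw [altIndex_keys]; exact PySem.Set.nodup_ofList _

theorem mem_altIndex_keys (works : List (String × List String)) (w : String) (i : Nat)
    (hi : i < works.length) (hw : w ∈ wset works i) : w ∈ (altIndex works).keys := by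
  rw [altIndex_keys, PySem.Set.mem_ofList, List.mem_flatMap]
  refine ⟨((i : Int), works.getD i ("", [])), ?_, ?_⟩
  · rw [mem_enumerate]
    exact ⟨i, by simp, by rw [List.getElem?_eq_getElem hi, List.getD_eq_getElem _ _ hi]⟩
  · simpa [wset] using hw

theorem count_pairs_combinations (p : List Int) (hp : p.Pairwise (· < ·)) (i j : Int)
    (hij : i < j) :
    ((PySem.List.combinations p 2).map toPair).count (i, j) =
      (if i ∈ p ∧ j ∈ p then 1 else 0) := by
  induction p with
  | nil => simp [PySem.List.combinations_nil_succ]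
  | cons x t ih =>
    rw [List.pairwise_cons] at hp
    obtain ⟨hx, ht⟩ := hp
    rw [show (2 : Nat) = 1 + 1 from rfl, PySem.List.combinations_cons_succ,
      PySem.List.combinations_one]
    rw [List.map_append, List.count_append, List.map_map, List.map_map]
    rw [(by rfl : (1 + 1 : Nat) = 2)]
    have hfirst : (t.map ((toPair ∘ fun c => x :: c) ∘ fun y => [y])).count (i, j)
        = (if x = i then t.count j else 0) := by
      have he : ((toPair ∘ fun c => x :: c) ∘ fun y => [y]) = (fun y => ((x, y) : Int × Int)) := rfl
      rw [he]
      by_cases hxi : x = i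
      · subst hxi
        rw [List.count, List.countP_map]
        rw [show ((· == (x, j)) ∘ fun y => (x, y)) = (· == j) by
          funext y; simp [Prod.ext_iff]]
        simp [List.count]
      · rw [if_neg hxi, List.count_eq_zero]
        simp only [List.mem_map, not_exists]
        rintro y ⟨hy, he2⟩
        apply hxi
        have h3 := congrArg Prod.fst he2
        simp at h3
        omega
    rw [hfirst, ih ht]
    have hnd : t.Nodup := ht.imp (fun h => ne_of_lt h)
    by_cases hxi : x = i
    · subst hxi
      have hxt : x ∉ t := fun h => lt_irrefl x (hx x h)
      have hcnt : t.count j = if j ∈ t then 1 else 0 := by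
        rcases Nat.eq_zero_or_pos (t.count j) with h0 | hp
        · simp [List.count_eq_zero.mp h0, h0]
        · have hle := List.nodup_iff_count_le_one.mp hnd j
          have h1 : t.count j = 1 := by omega
          simp [h1, List.count_pos_iff.mp hp]
      simp only [if_neg (fun hh : x ∈ t ∧ j ∈ t => hxt hh.1)]
      rw [hcnt]
      by_cases hj : j ∈ t
      · simp [hj, List.mem_cons]
      · have : ¬ (x ∈ (x :: t) ∧ j ∈ (x :: t)) := by
          rintro ⟨_, hj2⟩
          rcases List.mem_cons.mp hj2 with rfl | h; omega; exact hj h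
        simp [hj]
        omega
    · simp only [if_neg hxi]
      by_cases hi : i ∈ t
      · have hxlti : x < i := hx i hi
        have hjx : j ≠ x := by intro h; subst h; omega
        have : (i ∈ (x :: t) ∧ j ∈ (x :: t)) ↔ (i ∈ t ∧ j ∈ t) := by
          simp only [List.mem_cons]
          constructor
          · rintro ⟨h1, h2⟩
            refine ⟨?_, ?_⟩
            · rcases h1 with rfl | h; exact absurd rfl hxi; exact h
            · rcases h2 with rfl | h; exact absurd rfl hjx; exact h
          · rintro ⟨h1, h2⟩; exact ⟨Or.inr h1, Or.inr h2⟩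
        rw [if_congr this rfl rfl]
        omega
      · have : ¬ (i ∈ (x :: t) ∧ j ∈ (x :: t)) := by
          rintro ⟨h1, _⟩
          rcases List.mem_cons.mp h1 with rfl | h; exact hxi rfl; exact hi h
        have h2 : ¬ (i ∈ t ∧ j ∈ t) := fun hh => hi hh.1
        rw [if_neg h2, if_neg this]

theorem sum_map_ite {α : Type} (l : List α) (p : α → Prop) [DecidablePred p] :
    (l.map (fun x => if p x then (1 : Nat) else 0)).sum = l.countP (fun x => decide (p x)) := by
  induction l with
  | nil => rfl
  | cons x t ih =>
    by_cases h : p x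
    · simp [h, ih]; omega
    · simp [h, ih]

theorem altCounts_getD (works : List (String × List String)) (i j : Int) (hij : i < j) :
    (altCounts works).getD (i, j) 0 =
      ((altIndex works).keys.countP
        (fun w => decide (i ∈ (altIndex works).getD w [] ∧ j ∈ (altIndex works).getD w [])) : Int) := by
  unfold altCounts
  have h1 : ∀ (d : PySem.Dict (Int × Int) Int) (plist : List Int),
      (PySem.List.combinations plist 2).foldl (fun d c =>
        match c with
        | [a, b] => d.modify (a, b) 0 (fun v => v + 1)
        | _ => d) d
      = ((PySem.List.combinations plist 2).map toPair).foldl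
          (fun d k => d.modify k 0 (fun v => v + 1)) d := by
    intro d plist
    rw [List.foldl_map]
    apply PySem.List.foldl_congr_mem
    intro acc c hc
    have hlen := PySem.List.length_of_mem_combinations hc
    match c, hlen with
    | [a, b], _ => rfl
  rw [PySem.List.foldl_congr_mem _ _ _ _ (fun acc x _ => h1 acc x)]
  rw [← List.foldl_flatMap]
  rw [PySem.Dict.getD_foldl_modify_add_one]
  rw [PySem.Dict.getD_empty, List.count_flatMap]
  rw [show (altIndex works).values
      = (altIndex works).keys.map (fun w => (altIndex works).getD w []) by
    rw [PySem.Dict.values, PySem.Dict.items_eq_map_keys _ (altIndex_keys_nodup works) []]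
    rw [List.map_map]; rfl]
  rw [List.map_map]
  have h2 : ∀ w ∈ (altIndex works).keys,
      ((List.count (i, j) ∘ fun p => (PySem.List.combinations p 2).map toPair) ∘
        fun w => (altIndex works).getD w []) w
      = (fun w => if i ∈ (altIndex works).getD w [] ∧ j ∈ (altIndex works).getD w []
          then (1 : Nat) else 0) w := by
    intro w _
    simp only [Function.comp_apply]
    rw [count_pairs_combinations _ (altIndex_getD_pairwise works w) _ _ hij]
  rw [List.map_congr_left h2, sum_map_ite]
  omega

theorem counts_eq_inter (works : List (String × List String)) (i j : Nat) (hij : i < j)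
    (hj : j < works.length) :
    (altCounts works).getD ((i : Int), (j : Int)) 0 =
      normalCompare (works.getD i ("", [])).2 (works.getD j ("", [])).2 := by
  have hi : i < works.length := lt_trans hij hj
  rw [altCounts_getD works _ _ (by exact_mod_cast hij)]
  have h1 : ∀ w ∈ (altIndex works).keys,
      (decide ((i : Int) ∈ (altIndex works).getD w [] ∧ (j : Int) ∈ (altIndex works).getD w []) = true
        ↔ decide (w ∈ wset works i ∧ w ∈ wset works j) = true) := by
    intro w _
    simp only [decide_eq_true_eq]
    rw [mem_altIndex_getD works w i hi, mem_altIndex_getD works w j hj]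
  rw [List.countP_congr (q := fun w => decide (w ∈ wset works i ∧ w ∈ wset works j)) h1]
  show _ = (PySem.Set.len (PySem.Set.inter (wset works i) (wset works j)) : Int)
  rw [PySem.Set.len, PySem.Set.inter]
  congr 1
  rw [List.countP_eq_length_filter]
  apply List.Perm.length_eq
  apply (List.perm_ext_iff_of_nodup
    (List.Nodup.filter _ (altIndex_keys_nodup works))
    (List.Nodup.filter _ (show (wset works i).Nodup from PySem.Set.nodup_ofList _))).mpr
  intro w
  rw [List.mem_filter, List.mem_filter]
  simp only [decide_eq_true_eq]
  constructor
  · rintro ⟨_, hw1, hw2⟩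
    exact ⟨hw1, (PySem.Set.contains_iff _ _).mpr hw2⟩
  · rintro ⟨hw1, hw2⟩
    exact ⟨mem_altIndex_keys works w i hi hw1, hw1, (PySem.Set.contains_iff _ _).mp hw2⟩

theorem real_eq_alt (works : List (String × List String)) : real works = real_alt works := by
  unfold real real_alt
  congr 1
  congr 1
  apply PySem.List.foldl_congr_mem
  intro acc i hi
  rw [PySem.List.mem_pyRange_one] at hi
  apply PySem.List.foldl_congr_mem
  intro acc2 j hj
  rw [PySem.List.mem_pyRange_one] at hj
  have h0i : 0 ≤ i := hi.1
  have hIJ : i < j := by omega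
  obtain ⟨a, rfl⟩ : ∃ a : Nat, i = (a : Int) := ⟨i.toNat, (Int.toNat_of_nonneg h0i).symm⟩
  obtain ⟨b, rfl⟩ : ∃ b : Nat, j = (b : Int) := ⟨j.toNat, (Int.toNat_of_nonneg (by omega)).symm⟩
  have hab : a < b := by exact_mod_cast hIJ
  have hbn : b < works.length := by exact_mod_cast hj.2
  rw [PySem.List.pyGetD_of_nonneg works _ h0i, PySem.List.pyGetD_of_nonneg works _ (by positivity)]
  simp only [Int.toNat_natCast]
  rw [counts_eq_inter works a b hab hbn]

-- ===== VERDICT (by name: the statement is the Claim_ definition above) =====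
theorem real_spec : Claim_equal_real := by
  intro works _
  exact real_eq_alt works
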